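-- pv_equiv track=rewrite | github.com/DexterHaslem/cme-tools | futuresstats.py | group_by_product
-- ===== SOURCE A (Python) =====
-- ROWS_KEY = 'rows'
--
-- def group_by_product(rows):
--     # we get list of raw rows from csv, each contract is broken down,
--     # lets group by product so its easier to display in a summarized form
--     ret = {}
--
--     sorted_vol = sorted(rows, key=lambda v: v['EST. VOL'])
--     for r in sorted_vol:
--         sym = r['PRODUCT SYMBOL']
--         # key by product
--         if sym in ret:
--             ret[sym][ROWS_KEY].append(r)
--         else:
--             ret[sym] = {ROWS_KEY: [r]}
--
--     return ret
-- ===== SOURCE B (Python) =====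
-- ROWS_KEY = 'rows'
--
-- def group_by_product(rows):
--     # dedup-then-filter decomposition: distinct symbols in order of first
--     # appearance in the volume-sorted list, then one filter per symbol
--     svol = sorted(rows, key=lambda v: v['EST. VOL'])
--     syms = dict.fromkeys(r['PRODUCT SYMBOL'] for r in svol)
--     return {s: {ROWS_KEY: [r for r in svol if r['PRODUCT SYMBOL'] == s]} for s in syms}
-- ===== Notes on version B (the rewrite author's own statement) =====
-- stated objective: simpler
-- what changed: A builds the result in one pass by mutating a dict of groups; B first deduplicates the product symbols (in volume-sorted first-appearance order) and then builds each group with one filter per symbol, with no dict mutation.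
-- outside the precondition, e.g. on group_by_product([{'PRODUCT SYMBOL': 'ES'}]): A raises KeyError, B raises KeyError
import Mathlib
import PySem

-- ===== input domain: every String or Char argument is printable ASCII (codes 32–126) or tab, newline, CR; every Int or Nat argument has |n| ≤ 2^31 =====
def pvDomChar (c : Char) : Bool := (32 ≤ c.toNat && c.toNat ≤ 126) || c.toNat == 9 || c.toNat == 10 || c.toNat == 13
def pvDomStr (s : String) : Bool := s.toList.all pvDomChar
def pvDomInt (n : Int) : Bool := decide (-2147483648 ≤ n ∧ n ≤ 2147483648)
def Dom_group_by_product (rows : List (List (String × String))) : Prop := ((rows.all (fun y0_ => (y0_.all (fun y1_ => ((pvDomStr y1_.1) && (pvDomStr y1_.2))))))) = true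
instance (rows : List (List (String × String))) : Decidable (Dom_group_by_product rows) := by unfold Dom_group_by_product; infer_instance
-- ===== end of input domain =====

-- B replaces A's single-pass dict accumulation by an ordered dedup of the symbols plus one
-- filter per symbol (objective: simpler — three declarative lines, no dict mutation).

-- r[k] on a row dict r; Pre_ guarantees the key is present, so the "" default is never reached
def pvRowGet (r : List (String × String)) (k : String) : String :=
  (PySem.Dict.mk r).getD k ""

-- ===== PORT A =====
def group_by_product (rows : List (List (String × String))) : List (String × List (String × List (List (String × String)))) :=
  let sorted_vol := PySem.List.sorted rows (fun v => pvRowGet v "EST. VOL") false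
  let ret := sorted_vol.foldl
    (fun (ret : PySem.Dict String (PySem.Dict String (List (List (String × String))))) r =>
      let sym := pvRowGet r "PRODUCT SYMBOL"
      if ret.contains sym then
        -- ret[sym][ROWS_KEY].append(r): in-place append at key 'rows' of the inner dict at key sym
        ret.modify sym PySem.Dict.empty (fun inner => inner.modify "rows" [] (fun l => l ++ [r]))
      else
        ret.insert sym (PySem.Dict.empty.insert "rows" [r]))
    PySem.Dict.empty
  ret.items.map (fun p => (p.1, p.2.items))

-- ===== PORT B =====
def group_by_product_alt (rows : List (List (String × String))) : List (String × List (String × List (List (String × String)))) :=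
  let svol := PySem.List.sorted rows (fun v => pvRowGet v "EST. VOL") false
  let syms := PySem.List.dedup (svol.map (fun r => pvRowGet r "PRODUCT SYMBOL"))
  syms.map (fun s => (s, [("rows", svol.filter (fun r => pvRowGet r "PRODUCT SYMBOL" == s))]))

-- ===== PRECONDITION & SPEC =====
-- Pre_ excludes rows lacking the 'EST. VOL' or 'PRODUCT SYMBOL' key (Python raises KeyError there)
def Pre_group_by_product (rows : List (List (String × String))) : Prop :=
  (rows.all (fun r => (PySem.Dict.mk r).contains "EST. VOL"
      && (PySem.Dict.mk r).contains "PRODUCT SYMBOL")) = true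
instance (rows : List (List (String × String))) : Decidable (Pre_group_by_product rows) := by unfold Pre_group_by_product; infer_instance

def pvWitness_group_by_product : (List (List (String × String))) := []

-- decidable equality of the (deeply nested) output type, assembled by layers because
-- instance search does not reach it in one step
def pvDecEqInner : DecidableEq (List (String × List (List (String × String)))) := by infer_instance
def pvDecEqOut : DecidableEq (List (String × List (String × List (List (String × String))))) :=
  fun a b => @List.hasDecEq _ (@instDecidableEqProd _ _ inferInstance (fun x y => pvDecEqInner x y)) a b

def Spec_group_by_product (rows : List (List (String × String))) (out : List (String × List (String × List (List (String × String))))) : Prop := out = group_by_product_alt rows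
instance (rows : List (List (String × String))) (out : List (String × List (String × List (List (String × String))))) : Decidable (Spec_group_by_product rows out) := by unfold Spec_group_by_product; exact pvDecEqOut _ _

-- ===== CLAIM (what is proved, stated in full; the proofs are below) =====
def Claim_equal_group_by_product : Prop := ∀ (rows : List (List (String × String))), Dom_group_by_product rows → Pre_group_by_product rows → Spec_group_by_product rows (group_by_product rows)

-- ===== LEMMAS AND PROOFS =====

-- abbreviations for the two loop bodies
def pvSym (r : List (String × String)) : String := pvRowGet r "PRODUCT SYMBOL"
def pvInner (i : PySem.Dict String (List (List (String × String)))) (r : List (String × String)) :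
    PySem.Dict String (List (List (String × String))) :=
  i.modify "rows" [] (fun l => l ++ [r])
def pvStep (d : PySem.Dict String (PySem.Dict String (List (List (String × String)))))
    (r : List (String × String)) : PySem.Dict String (PySem.Dict String (List (List (String × String)))) :=
  d.modify (pvSym r) PySem.Dict.empty (fun inner => pvInner inner r)

-- A's if/else IS a single modify at key pvSym r
lemma pvStep_eq (d : PySem.Dict String (PySem.Dict String (List (List (String × String)))))
    (r : List (String × String)) :
    (if d.contains (pvSym r) then
        d.modify (pvSym r) PySem.Dict.empty (fun inner => inner.modify "rows" [] (fun l => l ++ [r]))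
      else d.insert (pvSym r) (PySem.Dict.empty.insert "rows" [r])) = pvStep d r := by
  unfold pvStep pvInner
  split_ifs with h
  · rfl
  · rw [PySem.Dict.modify, PySem.Dict.getD_of_not_contains _ _ (by simpa using h)]
    rw [PySem.Dict.modify, PySem.Dict.getD_empty]
    simp

-- the group stored under s is exactly the s-rows of the processed prefix, in order
lemma pvGetD_foldl (l : List (List (String × String)))
    (d : PySem.Dict String (PySem.Dict String (List (List (String × String))))) (s : String) :
    (l.foldl pvStep d).getD s PySem.Dict.empty
      = (l.filter (fun r => pvSym r == s)).foldl pvInner (d.getD s PySem.Dict.empty) := by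
  induction l generalizing d with
  | nil => rfl
  | cons r t ih =>
    simp only [List.foldl_cons, List.filter_cons, ih]
    by_cases hs : pvSym r = s
    · simp [hs, pvStep]
    · rw [pvStep, PySem.Dict.getD_modify, if_neg (Ne.symm hs)]
      simp [hs]

-- appending rows one by one to an inner {'rows': v} dict
lemma pvInner_foldl (g : List (List (String × String))) (v : List (List (String × String))) :
    (g.foldl pvInner (PySem.Dict.mk [("rows", v)])).items = [("rows", v ++ g)] := by
  induction g generalizing v with
  | nil => simp
  | cons a t ih =>
    have h1 : pvInner (PySem.Dict.mk [("rows", v)]) a = PySem.Dict.mk [("rows", v ++ [a])] := by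
      simp [pvInner, PySem.Dict.modify, PySem.Dict.insert, PySem.Dict.getD, PySem.Dict.get?,
        PySem.Dict.contains]
    simp only [List.foldl_cons, h1, ih]
    simp

lemma pvInner_foldl_empty (g : List (List (String × String))) (hg : g ≠ []) :
    (g.foldl pvInner PySem.Dict.empty).items = [("rows", g)] := by
  cases g with
  | nil => exact absurd rfl hg
  | cons a t =>
    have h1 : pvInner PySem.Dict.empty a = PySem.Dict.mk [("rows", [a])] := by
      simp [pvInner, PySem.Dict.modify, PySem.Dict.insert, PySem.Dict.getD, PySem.Dict.get?,
        PySem.Dict.contains, PySem.Dict.empty]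
    simp only [List.foldl_cons, h1, pvInner_foldl]
    simp

-- A's whole grouping fold, flattened to items, is B's dedup-and-filter expression
lemma pvMain (l : List (List (String × String))) :
    ((l.foldl pvStep PySem.Dict.empty).items.map (fun p => (p.1, p.2.items)))
      = (PySem.List.dedup (l.map pvSym)).map
          (fun s => (s, [("rows", l.filter (fun r => pvSym r == s))])) := by
  have hkeys : (l.foldl pvStep PySem.Dict.empty).keys = PySem.List.dedup (l.map pvSym) := by
    have := PySem.Dict.keys_foldl_modify_key l pvSym PySem.Dict.empty
      (fun _ r => (pvInner · r)) PySem.Dict.empty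
    simpa [pvStep, PySem.Dict.keys_empty, PySem.Set.update, ← PySem.Set.ofList_eq_foldl,
      PySem.List.dedup_eq_ofList] using this
  have hnodup : (l.foldl pvStep PySem.Dict.empty).keys.Nodup := by
    have := PySem.Dict.nodup_keys_foldl_modify_key l pvSym PySem.Dict.empty
      (fun _ r => (pvInner · r)) PySem.Dict.empty (by simp [PySem.Dict.keys_empty])
    simpa [pvStep] using this
  have hkeysdef : (l.foldl pvStep PySem.Dict.empty).keys
      = (l.foldl pvStep PySem.Dict.empty).items.map Prod.fst := rfl
  rw [← hkeys, hkeysdef, List.map_map]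
  apply List.map_congr_left
  intro p hp
  have hmem : p.1 ∈ (l.foldl pvStep PySem.Dict.empty).keys := by
    rw [hkeysdef]; exact List.mem_map_of_mem hp
  have hgd : (l.foldl pvStep PySem.Dict.empty).getD p.1 PySem.Dict.empty = p.2 :=
    PySem.Dict.getD_of_mem_items _ (by cases p; exact hp) hnodup _
  have hin : p.1 ∈ l.map pvSym := by
    rw [hkeys, PySem.List.dedup_eq_ofList] at hmem
    exact (PySem.Set.mem_ofList _ _).mp hmem
  have hfne : l.filter (fun r => pvSym r == p.1) ≠ [] := by
    obtain ⟨r, hr, hsr⟩ := List.mem_map.mp hin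
    intro hnil
    have : r ∈ l.filter (fun r => pvSym r == p.1) := by
      rw [List.mem_filter]; exact ⟨hr, by simp [hsr]⟩
    simp [hnil] at this
  have hfold := pvGetD_foldl l PySem.Dict.empty p.1
  rw [PySem.Dict.getD_empty, hgd] at hfold
  have h2 := pvInner_foldl_empty _ hfne
  rw [← hfold] at h2
  simp [h2]

-- ===== VERDICT (by name: the statement is the Claim_ definition above) =====
theorem group_by_product_spec : Claim_equal_group_by_product := by
  intro rows _ _
  unfold Spec_group_by_product group_by_product group_by_product_alt
  have hstep : (fun (ret : PySem.Dict String (PySem.Dict String (List (List (String × String))))) r =>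
      let sym := pvRowGet r "PRODUCT SYMBOL"
      if ret.contains sym then
        ret.modify sym PySem.Dict.empty (fun inner => inner.modify "rows" [] (fun l => l ++ [r]))
      else ret.insert sym (PySem.Dict.empty.insert "rows" [r])) = pvStep := by
    funext d r
    exact pvStep_eq d r
  simp only [hstep]
  exact pvMain _
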